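-- pv_equiv track=rewrite | github.com/ZetsubouCode/BatchBench | services/webtoon_splitter.py | _fill_small_gaps
-- ===== SOURCE A (Python) =====
-- from typing import Tuple, List
--
-- def _fill_small_gaps(rows: List[bool], max_gap: int) -> List[bool]:
--     if max_gap <= 0:
--         return rows
--     out = rows[:]
--     i = 0
--     n = len(rows)
--     while i < n:
--         if out[i]:
--             i += 1
--             continue
--         start = i
--         while i < n and not out[i]:
--             i += 1
--         end = i - 1
--         if start > 0 and i < n and (end - start + 1) <= max_gap:
--             for k in range(start, end + 1):
--                 out[k] = True
--     return out
-- ===== SOURCE B (Python) =====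
-- from typing import List
--
-- def _fill_small_gaps(rows: List[bool], max_gap: int) -> List[bool]:
--     if max_gap <= 0:
--         return rows
--     out = rows[:]
--     trues = [k for k in range(len(rows)) if rows[k]]
--     for p, q in zip(trues, trues[1:]):
--         if 1 <= q - p - 1 <= max_gap:
--             for k in range(p + 1, q):
--                 out[k] = True
--     return out
-- ===== Notes on version B (the rewrite author's own statement) =====
-- stated objective: simpler
-- what changed: Replaces A's index-chasing while-loop with nested scan and run bookkeeping by a flat pass: collect the indices of True entries once, then fill the interval between each consecutive pair whose interior gap is between 1 and max_gap.
import Mathlib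
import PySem

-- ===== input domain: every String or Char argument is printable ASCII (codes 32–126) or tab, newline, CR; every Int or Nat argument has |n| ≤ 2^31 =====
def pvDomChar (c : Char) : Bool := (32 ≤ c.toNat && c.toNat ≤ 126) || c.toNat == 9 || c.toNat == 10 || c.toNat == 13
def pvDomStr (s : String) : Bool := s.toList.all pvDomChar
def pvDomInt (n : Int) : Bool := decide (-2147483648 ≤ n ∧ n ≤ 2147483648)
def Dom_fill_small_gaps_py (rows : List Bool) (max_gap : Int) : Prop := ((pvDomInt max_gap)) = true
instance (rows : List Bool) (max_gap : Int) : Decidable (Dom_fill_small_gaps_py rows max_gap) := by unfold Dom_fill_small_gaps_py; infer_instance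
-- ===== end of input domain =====

-- B replaces A's index-chasing while-loop (nested scan over False-runs with in-place fills)
-- by a flat decomposition: list the True indices once, then fill between each consecutive
-- pair whose interior gap length is between 1 and max_gap. Objective: simpler.

-- ===== PORT A =====

-- inner `while i < n and not out[i]: i += 1` of A
def pvScanFalse (out : List Bool) (i : Nat) : Nat :=
  if h : i < out.length ∧ out[i]! = false then pvScanFalse out (i + 1) else i
termination_by out.length - i
decreasing_by omega

-- `for k in range(start, end+1): out[k] = True` of A
def pvFillRange (out : List Bool) (s e : Nat) : List Bool :=
  (List.range' s (e + 1 - s)).foldl (fun o k => o.set k true) out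

-- lemmas the port needs for termination (cited in decreasing_by)
theorem pvScanFalse_ge (out : List Bool) (i : Nat) : i ≤ pvScanFalse out i := by
  rw [pvScanFalse]
  split
  · have := pvScanFalse_ge out (i + 1); omega
  · exact le_rfl
termination_by out.length - i
decreasing_by omega

theorem pvScanFalse_gt (out : List Bool) (i : Nat)
    (h1 : i < out.length) (h2 : out[i]! = false) : i < pvScanFalse out i := by
  rw [pvScanFalse]
  rw [dif_pos ⟨h1, h2⟩]
  have := pvScanFalse_ge out (i + 1); omega

theorem pvFillRange_length (out : List Bool) (s e : Nat) :
    (pvFillRange out s e).length = out.length := by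
  unfold pvFillRange
  generalize List.range' s (e + 1 - s) = l
  induction l generalizing out with
  | nil => rfl
  | cons a t ih => simpa [List.foldl] using ih (out.set a true)

-- A's outer `while i < n` loop (out mutated in place in Python; threaded here)
def pvLoopA (out : List Bool) (i : Nat) (max_gap : Int) : List Bool :=
  if h : i < out.length then
    if out[i]! then pvLoopA out (i + 1) max_gap
    else
      let start := i
      let j := pvScanFalse out i
      let e := j - 1
      let out' := if 0 < start ∧ j < out.length ∧ ((e : Int) - (start : Int) + 1) ≤ max_gap
                  then pvFillRange out start e else out
      pvLoopA out' j max_gap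
  else out
termination_by out.length - i
decreasing_by
  · omega
  · rename_i hb
    have hgt : i < pvScanFalse out i := pvScanFalse_gt out i h (by simpa using hb)
    split
    · rw [pvFillRange_length]; omega
    · omega

def fill_small_gaps_py (rows : List Bool) (max_gap : Int) : List Bool :=
  if max_gap ≤ 0 then rows
  else pvLoopA rows 0 max_gap

-- ===== PORT B =====

-- body of B's `for p, q in zip(trues, trues[1:])` loop
def pvStepB (max_gap : Int) (out : List Bool) (pq : Nat × Nat) : List Bool :=
  if 1 ≤ (pq.2 : Int) - (pq.1 : Int) - 1 ∧ (pq.2 : Int) - (pq.1 : Int) - 1 ≤ max_gap then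
    (List.range' (pq.1 + 1) (pq.2 - (pq.1 + 1))).foldl (fun o k => o.set k true) out
  else out

def fill_small_gaps_py_alt (rows : List Bool) (max_gap : Int) : List Bool :=
  if max_gap ≤ 0 then rows
  else
    let trues := (List.range rows.length).filter (fun k => rows[k]!)
    (trues.zip (trues.drop 1)).foldl (pvStepB max_gap) rows

-- ===== PRECONDITION & SPEC =====
def Spec_fill_small_gaps_py (rows : List Bool) (max_gap : Int) (out : List Bool) : Prop := out = fill_small_gaps_py_alt rows max_gap
instance (rows : List Bool) (max_gap : Int) (out : List Bool) : Decidable (Spec_fill_small_gaps_py rows max_gap out) := by unfold Spec_fill_small_gaps_py; infer_instance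

-- ===== CLAIM (what is proved, stated in full; the proofs are below) =====
def Claim_equal_fill_small_gaps_py : Prop := ∀ (rows : List Bool) (max_gap : Int), Dom_fill_small_gaps_py rows max_gap → Spec_fill_small_gaps_py rows max_gap (fill_small_gaps_py rows max_gap)

-- ===== LEMMAS AND PROOFS =====

-- the list of indices k ≥ i with rows[k] = true, in order
def truesFrom (rows : List Bool) (i : Nat) : List Nat :=
  if h : i < rows.length then
    (if rows[i]! then [i] else []) ++ truesFrom rows (i + 1)
  else []
termination_by rows.length - i
decreasing_by omega

def pairsOf (ts : List Nat) : List (Nat × Nat) := ts.zip (ts.drop 1)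

theorem truesFrom_stop (rows : List Bool) (i : Nat) (h : ¬ i < rows.length) :
    truesFrom rows i = [] := by rw [truesFrom, dif_neg h]

theorem truesFrom_true (rows : List Bool) (i : Nat) (h : i < rows.length)
    (ht : rows[i]! = true) : truesFrom rows i = i :: truesFrom rows (i + 1) := by
  rw [truesFrom, dif_pos h, ht]; simp

theorem truesFrom_false (rows : List Bool) (i : Nat) (h : i < rows.length)
    (ht : rows[i]! = false) : truesFrom rows i = truesFrom rows (i + 1) := by
  rw [truesFrom, dif_pos h, ht]; simp

-- a run of False entries contributes nothing
theorem truesFrom_of_false_run (rows : List Bool) (i j : Nat) (hij : i ≤ j)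
    (hf : ∀ k, i ≤ k → k < j → rows[k]! = false) :
    truesFrom rows i = truesFrom rows j := by
  rcases Nat.lt_or_ge i j with hlt | hge
  · by_cases h : i < rows.length
    · rw [truesFrom_false rows i h (hf i le_rfl hlt)]
      exact truesFrom_of_false_run rows (i + 1) j (by omega) (fun k hk1 hk2 => hf k (by omega) hk2)
    · rw [truesFrom_stop rows i h, truesFrom_stop rows j (by omega)]
  · have : i = j := by omega
    rw [this]
termination_by j - i
decreasing_by omega

theorem filter_range'_eq_truesFrom (rows : List Bool) (i : Nat) :
    (List.range' i (rows.length - i)).filter (fun k => rows[k]!) = truesFrom rows i := by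
  by_cases h : i < rows.length
  · have hm : rows.length - i = (rows.length - (i + 1)) + 1 := by omega
    rw [hm, List.range'_succ, List.filter_cons]
    rw [truesFrom, dif_pos h]
    have ih := filter_range'_eq_truesFrom rows (i + 1)
    cases hb : rows[i]! <;>
      simp only [hb, ih, Bool.false_eq_true, if_false, if_true, List.nil_append,
        List.singleton_append, reduceIte]
  · have hm : rows.length - i = 0 := by omega
    rw [hm, truesFrom_stop rows i h]; rfl
termination_by rows.length - i
decreasing_by omega

theorem foldl_set_getElem!_of_gt (l : List Nat) (out : List Bool) (k : Nat)
    (h : ∀ m ∈ l, m < k) :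
    (l.foldl (fun o k => o.set k true) out)[k]! = out[k]! := by
  induction l generalizing out with
  | nil => rfl
  | cons a t ih =>
    have ha : a ≠ k := by have := h a (by simp); omega
    simp only [List.foldl_cons]
    rw [ih (out.set a true) (fun m hm => h m (by simp [hm]))]
    simp only [List.getElem!_eq_getElem?_getD]
    rw [List.getElem?_set_ne ha]

theorem pvScanFalse_le (out : List Bool) (i : Nat) (h : i ≤ out.length) :
    pvScanFalse out i ≤ out.length := by
  rw [pvScanFalse]
  split
  · exact pvScanFalse_le out (i + 1) (by omega)
  · exact h
termination_by out.length - i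
decreasing_by omega

theorem pvScanFalse_false_run (out : List Bool) (i : Nat) :
    ∀ k, i ≤ k → k < pvScanFalse out i → out[k]! = false := by
  intro k hk1 hk2
  rw [pvScanFalse] at hk2
  split at hk2
  · rename_i hc
    rcases Nat.eq_or_lt_of_le hk1 with rfl | h
    · exact hc.2
    · exact pvScanFalse_false_run out (i + 1) k h hk2
  · omega
termination_by out.length - i
decreasing_by omega

theorem pvScanFalse_stop_true (out : List Bool) (i : Nat)
    (h : pvScanFalse out i < out.length) : out[pvScanFalse out i]! = true := by
  by_cases hc : i < out.length ∧ out[i]! = false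
  · rw [pvScanFalse, dif_pos hc] at h ⊢
    exact pvScanFalse_stop_true out (i + 1) h
  · rw [pvScanFalse, dif_neg hc] at h ⊢
    cases hb : out[i]! with
    | true => rfl
    | false => exact absurd ⟨h, hb⟩ hc
termination_by out.length - i
decreasing_by omega

-- main invariant: from a True position i, A's remaining loop equals B's fold over the
-- remaining consecutive-True pairs
theorem pairsOf_cons_cons (a b : Nat) (l : List Nat) :
    pairsOf (a :: b :: l) = (a, b) :: pairsOf (b :: l) := rfl

theorem pairsOf_single (a : Nat) : pairsOf [a] = [] := rfl

theorem pvLoopA_stop (out : List Bool) (i : Nat) (g : Int) (h : ¬ i < out.length) :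
    pvLoopA out i g = out := by rw [pvLoopA, dif_neg h]

theorem pvLoopA_step_true (out : List Bool) (i : Nat) (g : Int)
    (h1 : i < out.length) (h2 : out[i]! = true) :
    pvLoopA out i g = pvLoopA out (i + 1) g := by
  rw [pvLoopA, dif_pos h1, h2, if_pos rfl]

theorem pvLoopA_step_false (out : List Bool) (i : Nat) (g : Int)
    (h1 : i < out.length) (h2 : out[i]! = false) :
    pvLoopA out i g =
      pvLoopA (if 0 < i ∧ pvScanFalse out i < out.length ∧
                  ((pvScanFalse out i - 1 : Nat) : Int) - (i : Int) + 1 ≤ g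
               then pvFillRange out i (pvScanFalse out i - 1) else out)
        (pvScanFalse out i) g := by
  rw [pvLoopA, dif_pos h1, h2]
  rfl

theorem pvMain (rows : List Bool) (g : Int) (i : Nat) (out : List Bool)
    (hlen : out.length = rows.length)
    (hagree : ∀ k, i ≤ k → k < rows.length → out[k]! = rows[k]!)
    (hi : i < rows.length) (ht : rows[i]! = true) :
    pvLoopA out i g = (pairsOf (truesFrom rows i)).foldl (pvStepB g) out := by
  have hiL : i < out.length := by omega
  have hout_i : out[i]! = true := by rw [hagree i le_rfl hi, ht]
  rw [pvLoopA_step_true out i g hiL hout_i]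
  rw [truesFrom_true rows i hi ht]
  by_cases hn : i + 1 < rows.length
  · have hagree1 : out[i + 1]! = rows[i + 1]! := hagree (i + 1) (by omega) hn
    cases hb : rows[i + 1]! with
    | true =>
      rw [truesFrom_true rows (i + 1) hn hb, pairsOf_cons_cons, List.foldl_cons]
      have hstep : pvStepB g out (i, i + 1) = out := by
        simp only [pvStepB]
        rw [if_neg (by push_cast; omega)]
      rw [hstep, ← truesFrom_true rows (i + 1) hn hb]
      exact pvMain rows g (i + 1) out hlen (fun k hk1 hk2 => hagree k (by omega) hk2) hn hb
    | false =>
      have hb' : out[i + 1]! = false := by rw [hagree1, hb]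
      rw [pvLoopA_step_false out (i + 1) g (by omega) hb']
      have hq1 : i + 1 < pvScanFalse out (i + 1) := pvScanFalse_gt out (i + 1) (by omega) hb'
      have hq2 : pvScanFalse out (i + 1) ≤ rows.length := by
        rw [← hlen]; exact pvScanFalse_le out (i + 1) (by omega)
      set q := pvScanFalse out (i + 1) with hqdef
      have hrun : ∀ k, i + 1 ≤ k → k < q → rows[k]! = false := by
        intro k hk1 hk2
        rw [← hagree k (by omega) (by omega)]
        exact pvScanFalse_false_run out (i + 1) k hk1 hk2
      rw [truesFrom_of_false_run rows (i + 1) q (by omega) hrun]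
      by_cases hqn : q < rows.length
      · have hqt : rows[q]! = true := by
          rw [← hagree q (by omega) hqn]
          exact pvScanFalse_stop_true out (i + 1) (by omega)
        rw [truesFrom_true rows q hqn hqt, pairsOf_cons_cons, List.foldl_cons]
        by_cases hcond : (q : Int) - (i : Int) - 1 ≤ g
        · have hA : (if 0 < i + 1 ∧ q < out.length ∧
                        ((q - 1 : Nat) : Int) - ((i + 1 : Nat) : Int) + 1 ≤ g
                     then pvFillRange out (i + 1) (q - 1) else out)
                    = pvFillRange out (i + 1) (q - 1) := by
            rw [if_pos (by refine ⟨by omega, by omega, by push_cast [Nat.cast_sub (by omega : 1 ≤ q)]; omega⟩)]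
          have hB : pvStepB g out (i, q) = pvFillRange out (i + 1) (q - 1) := by
            simp only [pvStepB, pvFillRange]
            rw [if_pos (by constructor <;> push_cast <;> omega)]
            rw [show q - (i + 1) = (q - 1) + 1 - (i + 1) from by omega]
          rw [hA, hB, ← truesFrom_true rows q hqn hqt]
          refine pvMain rows g q (pvFillRange out (i + 1) (q - 1)) ?_ ?_ hqn hqt
          · rw [pvFillRange_length]; exact hlen
          · intro k hk1 hk2
            unfold pvFillRange
            rw [foldl_set_getElem!_of_gt]
            · exact hagree k (by omega) hk2
            · intro m hm
              rw [List.mem_range'_1] at hm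
              omega
        · have hA : (if 0 < i + 1 ∧ q < out.length ∧
                          ((q - 1 : Nat) : Int) - ((i + 1 : Nat) : Int) + 1 ≤ g
                       then pvFillRange out (i + 1) (q - 1) else out) = out := by
            rw [if_neg (by push_cast [Nat.cast_sub (by omega : 1 ≤ q)]; omega)]
          have hB : pvStepB g out (i, q) = out := by
            simp only [pvStepB]
            rw [if_neg (by push_cast; omega)]
          rw [hA, hB, ← truesFrom_true rows q hqn hqt]
          exact pvMain rows g q out hlen (fun k hk1 hk2 => hagree k (by omega) hk2) hqn hqt
      · have hA : (if 0 < i + 1 ∧ q < out.length ∧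
                      ((q - 1 : Nat) : Int) - ((i + 1 : Nat) : Int) + 1 ≤ g
                   then pvFillRange out (i + 1) (q - 1) else out) = out := by
          rw [if_neg (by omega)]
        rw [hA, pvLoopA_stop out q g (by omega), truesFrom_stop rows q hqn, pairsOf_single,
          List.foldl_nil]
  · rw [truesFrom_stop rows (i + 1) hn, pvLoopA_stop out (i + 1) g (by omega), pairsOf_single,
      List.foldl_nil]
termination_by rows.length - i
decreasing_by all_goals omega

theorem pvStart (rows : List Bool) (g : Int) :
    pvLoopA rows 0 g = (pairsOf (truesFrom rows 0)).foldl (pvStepB g) rows := by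
  by_cases h0 : 0 < rows.length
  · cases hb : rows[0]! with
    | true => exact pvMain rows g 0 rows rfl (fun _ _ _ => rfl) h0 hb
    | false =>
      rw [pvLoopA_step_false rows 0 g h0 hb]
      have hq2 : pvScanFalse rows 0 ≤ rows.length := pvScanFalse_le rows 0 (by omega)
      set q := pvScanFalse rows 0 with hqdef
      have hrun : ∀ k, 0 ≤ k → k < q → rows[k]! = false :=
        fun k hk1 hk2 => pvScanFalse_false_run rows 0 k hk1 hk2
      rw [if_neg (by omega), truesFrom_of_false_run rows 0 q (by omega) hrun]
      by_cases hqn : q < rows.length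
      · exact pvMain rows g q rows rfl (fun _ _ _ => rfl) hqn (pvScanFalse_stop_true rows 0 hqn)
      · rw [pvLoopA_stop rows q g hqn, truesFrom_stop rows q hqn]
        rfl
  · rw [pvLoopA_stop rows 0 g h0, truesFrom_stop rows 0 h0]
    rfl

-- ===== VERDICT (by name: the statement is the Claim_ definition above) =====
theorem fill_small_gaps_py_spec : Claim_equal_fill_small_gaps_py := by
  intro rows g _
  unfold Spec_fill_small_gaps_py fill_small_gaps_py fill_small_gaps_py_alt
  by_cases hg : g ≤ 0
  · simp [hg]
  · simp only [if_neg hg]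
    rw [pvStart rows g]
    rw [List.range_eq_range']
    have : rows.length = rows.length - 0 := by omega
    rw [this, filter_range'_eq_truesFrom rows 0]
    rfl
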